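-- pv_equiv track=rewrite | github.com/hong0002/Baekjoon | 기타/단순한 문제 (Small).py | count_valid_triplets
-- ===== SOURCE A (Python) =====
-- def count_valid_triplets(a, b, c):
--     count = 0
--     for x in range(1, a + 1):
--         for y in range(1, b + 1):
--             for z in range(1, c + 1):
--                 if (x % y == y % z == z % x):
--                     count += 1
--     return count
-- ===== SOURCE B (Python) =====
-- def count_valid_triplets(a, b, c):
--     # For x,y,z >= 1 the chain x%y == y%z == z%x forces x == y == z:
--     # x < y would give x%y = x > z%x; y < z would give y%z = y > x%y;
--     # then z <= y <= x, and z < x would give z%x = z > y%z. So the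
--     # answer is the number of x with 1 <= x <= min(a, b, c).
--     return max(0, min(a, b, c))
-- ===== Notes on version B (the rewrite author's own statement) =====
-- stated objective: faster
-- what changed: Replaces the triple brute-force loop by the closed form max(0, min(a,b,c)), justified by a proof that x%y==y%z==z%x holds for positive x,y,z only when x==y==z.
import Mathlib
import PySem

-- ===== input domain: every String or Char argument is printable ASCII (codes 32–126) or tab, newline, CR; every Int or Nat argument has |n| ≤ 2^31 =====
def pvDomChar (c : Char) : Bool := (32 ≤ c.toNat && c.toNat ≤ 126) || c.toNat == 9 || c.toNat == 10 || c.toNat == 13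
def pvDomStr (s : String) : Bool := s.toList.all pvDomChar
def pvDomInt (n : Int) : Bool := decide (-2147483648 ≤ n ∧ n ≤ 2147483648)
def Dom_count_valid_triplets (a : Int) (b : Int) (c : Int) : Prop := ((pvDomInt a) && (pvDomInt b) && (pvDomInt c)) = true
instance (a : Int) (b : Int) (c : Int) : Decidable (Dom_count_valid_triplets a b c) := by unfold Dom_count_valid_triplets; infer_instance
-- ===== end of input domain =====

-- B replaces A's triple brute-force loop with the closed form max(0, min(a,b,c)),
-- correct because for positive x,y,z the chain x%y == y%z == z%x forces x = y = z;
-- objective: faster.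
-- ===== PORT A =====
def count_valid_triplets (a : Int) (b : Int) (c : Int) : Int :=
  (PySem.List.pyRange 1 (a + 1) 1).foldl (fun count x =>
    (PySem.List.pyRange 1 (b + 1) 1).foldl (fun count y =>
      (PySem.List.pyRange 1 (c + 1) 1).foldl (fun count z =>
        if PySem.Int.mod x y = PySem.Int.mod y z ∧ PySem.Int.mod y z = PySem.Int.mod z x then
          count + 1
        else count) count) count) 0

-- ===== PORT B =====
def count_valid_triplets_alt (a : Int) (b : Int) (c : Int) : Int :=
  max 0 (min (min a b) c)

-- ===== PRECONDITION & SPEC =====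
def Spec_count_valid_triplets (a : Int) (b : Int) (c : Int) (out : Int) : Prop := out = count_valid_triplets_alt a b c
instance (a : Int) (b : Int) (c : Int) (out : Int) : Decidable (Spec_count_valid_triplets a b c out) := by unfold Spec_count_valid_triplets; infer_instance

-- ===== CLAIM (what is proved, stated in full; the proofs are below) =====
def Claim_equal_count_valid_triplets : Prop := ∀ (a : Int) (b : Int) (c : Int), Dom_count_valid_triplets a b c → Spec_count_valid_triplets a b c (count_valid_triplets a b c)

-- ===== LEMMAS AND PROOFS =====

-- for positive x, y, z the triple-mod chain holds exactly when x = y = z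
lemma cond_iff (x y z : Int) (hx : 1 ≤ x) (hy : 1 ≤ y) (hz : 1 ≤ z) :
    (PySem.Int.mod x y = PySem.Int.mod y z ∧ PySem.Int.mod y z = PySem.Int.mod z x)
      ↔ (x = y ∧ y = z) := by
  rw [PySem.Int.mod_eq_emod_of_pos (by omega), PySem.Int.mod_eq_emod_of_pos (by omega),
    PySem.Int.mod_eq_emod_of_pos (by omega)]
  constructor
  · rintro ⟨h1, h2⟩
    have lt1 : x % y < y := Int.emod_lt_of_pos x (by omega)
    have lt2 : y % z < z := Int.emod_lt_of_pos y (by omega)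
    have lt3 : z % x < x := Int.emod_lt_of_pos z (by omega)
    have hyx : y ≤ x := by
      by_contra h
      have : x % y = x := Int.emod_eq_of_lt (by omega) (by omega)
      omega
    have hzy : z ≤ y := by
      by_contra h
      have : y % z = y := Int.emod_eq_of_lt (by omega) (by omega)
      omega
    have hzx : z = x := by
      by_contra h
      have : z % x = z := Int.emod_eq_of_lt (by omega) (by omega)
      omega
    omega
  · rintro ⟨rfl, rfl⟩
    exact ⟨rfl, rfl⟩

-- counting one value in a duplicate-free list
lemma countP_eq_ite_mem (l : List Int) (hnd : l.Nodup) (v : Int) :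
    ((l.countP (fun z => decide (v = z)) : ℕ) : Int) = if v ∈ l then 1 else 0 := by
  induction l with
  | nil => simp
  | cons h t ih =>
    rcases List.nodup_cons.mp hnd with ⟨hh, ht⟩
    by_cases hv : v = h
    · subst hv
      have : t.countP (fun z => decide (v = z)) = 0 :=
        List.countP_eq_zero.mpr (fun z hz => by
          simp only [decide_eq_true_eq]
          exact fun e => hh (e ▸ hz))
      simp [this]
    · simp [hv, ih ht]

-- the inner z-loop counts 1 exactly when x = y lies in [1, c]
lemma inner_z (x y c : Int) (hx : 1 ≤ x) (hy : 1 ≤ y) (cnt : Int) :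
    (PySem.List.pyRange 1 (c + 1) 1).foldl (fun count z =>
        if PySem.Int.mod x y = PySem.Int.mod y z ∧ PySem.Int.mod y z = PySem.Int.mod z x then
          count + 1 else count) cnt
      = cnt + (if x = y ∧ x ≤ c then 1 else 0) := by
  rw [PySem.List.foldl_ite_add_one]
  congr 1
  have hc : (PySem.List.pyRange 1 (c + 1) 1).countP
      (fun z => decide (PySem.Int.mod x y = PySem.Int.mod y z ∧ PySem.Int.mod y z = PySem.Int.mod z x))
      = (PySem.List.pyRange 1 (c + 1) 1).countP (fun z => decide (x = y ∧ y = z)) := by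
    apply List.countP_congr
    intro z hz
    have hz' := PySem.List.mem_pyRange_one.1 hz
    simp only [decide_eq_true_eq]
    exact cond_iff x y z hx hy (by omega)
  rw [hc]
  by_cases hxy : x = y
  · subst hxy
    have : (PySem.List.pyRange 1 (c + 1) 1).countP (fun z => decide (x = x ∧ x = z))
        = (PySem.List.pyRange 1 (c + 1) 1).countP (fun z => decide (x = z)) := by
      apply List.countP_congr
      intro z _
      simp
    rw [this, countP_eq_ite_mem _ (PySem.List.nodup_pyRange_one 1 (c + 1)) x]
    simp only [PySem.List.mem_pyRange_one, true_and]
    split_ifs <;> omega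
  · simp [hxy]

-- the y-loop counts 1 exactly when x lies in [1, min b c]
lemma inner_y (x b c : Int) (hx : 1 ≤ x) (cnt : Int) :
    (PySem.List.pyRange 1 (b + 1) 1).foldl (fun count y =>
        (PySem.List.pyRange 1 (c + 1) 1).foldl (fun count z =>
          if PySem.Int.mod x y = PySem.Int.mod y z ∧ PySem.Int.mod y z = PySem.Int.mod z x then
            count + 1 else count) count) cnt
      = cnt + (if x ≤ b ∧ x ≤ c then 1 else 0) := by
  have step : (PySem.List.pyRange 1 (b + 1) 1).foldl (fun count y =>
        (PySem.List.pyRange 1 (c + 1) 1).foldl (fun count z =>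
          if PySem.Int.mod x y = PySem.Int.mod y z ∧ PySem.Int.mod y z = PySem.Int.mod z x then
            count + 1 else count) count) cnt
      = (PySem.List.pyRange 1 (b + 1) 1).foldl (fun count y =>
          if x = y ∧ x ≤ c then count + 1 else count) cnt := by
    apply PySem.List.foldl_congr_mem
    intro acc y hy
    have hy' := PySem.List.mem_pyRange_one.1 hy
    rw [inner_z x y c hx (by omega) acc]
    split_ifs <;> simp
  rw [step, PySem.List.foldl_ite_add_one]
  congr 1
  by_cases hxc : x ≤ c
  · have : (PySem.List.pyRange 1 (b + 1) 1).countP (fun y => decide (x = y ∧ x ≤ c))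
        = (PySem.List.pyRange 1 (b + 1) 1).countP (fun y => decide (x = y)) := by
      apply List.countP_congr
      intro y _
      simp [hxc]
    rw [this, countP_eq_ite_mem _ (PySem.List.nodup_pyRange_one 1 (b + 1)) x]
    simp only [PySem.List.mem_pyRange_one]
    split_ifs <;> omega
  · simp [hxc]

-- counting x ∈ [1, a] with x ≤ m is max 0 (min a m)
lemma count_le (a m : Int) :
    (((PySem.List.pyRange 1 (a + 1) 1).countP (fun x => decide (x ≤ m))) : Int)
      = max 0 (min a m) := by
  have hfilter : (PySem.List.pyRange 1 (a + 1) 1).filter (fun x => decide (x ≤ m))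
      = PySem.List.pyRange 1 (min a m + 1) 1 := by
    have pwL : List.Pairwise (· < ·)
        ((PySem.List.pyRange 1 (a + 1) 1).filter (fun x => decide (x ≤ m))) :=
      (PySem.List.pairwise_lt_pyRange_one 1 (a + 1)).filter _
    have pwR := PySem.List.pairwise_lt_pyRange_one 1 (min a m + 1)
    refine List.Perm.eq_of_pairwise (fun p q _ _ h1 h2 => by omega) pwL pwR ?_
    refine (List.perm_ext_iff_of_nodup (pwL.imp Int.ne_of_lt) (pwR.imp Int.ne_of_lt)).mpr ?_
    intro x
    simp only [List.mem_filter, PySem.List.mem_pyRange_one, decide_eq_true_eq]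
    omega
  rw [List.countP_eq_length_filter, hfilter, PySem.List.length_pyRange_one]
  have : (min a m + 1 - 1) = min a m := by omega
  rw [this, Int.toNat_eq_max]
  omega

-- ===== VERDICT (by name: the statement is the Claim_ definition above) =====
theorem count_valid_triplets_spec : Claim_equal_count_valid_triplets := by
  intro a b c _
  unfold Spec_count_valid_triplets count_valid_triplets count_valid_triplets_alt
  have step : (PySem.List.pyRange 1 (a + 1) 1).foldl (fun count x =>
        (PySem.List.pyRange 1 (b + 1) 1).foldl (fun count y =>
          (PySem.List.pyRange 1 (c + 1) 1).foldl (fun count z =>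
            if PySem.Int.mod x y = PySem.Int.mod y z ∧ PySem.Int.mod y z = PySem.Int.mod z x then
              count + 1 else count) count) count) (0 : Int)
      = (PySem.List.pyRange 1 (a + 1) 1).foldl (fun count x =>
          if x ≤ min b c then count + 1 else count) (0 : Int) := by
    apply PySem.List.foldl_congr_mem
    intro acc x hx
    have hx' := PySem.List.mem_pyRange_one.1 hx
    rw [inner_y x b c (by omega) acc]
    split_ifs <;> omega
  rw [step, PySem.List.foldl_ite_add_one, count_le a (min b c)]
  omega
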